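-- pv_equiv track=rewrite | github.com/wjwitek/ASD2021L | Kolokwium III/euler_cycle.py | euler_cycle
-- ===== SOURCE A (Python) =====
-- def euler_cycle(edges, n):
--     # create adjacency list
--     graph = [[] for i in range(n)]
--     for u, v in edges:
--         if u not in graph[v]:
--             graph[u].append(v)
--             graph[v].append(u)
--     # check condition for euler cycle
--     for i in range(n):
--         if len(graph[i]) % 2:
--             return False
--     return True
-- ===== SOURCE B (Python) =====
-- def euler_cycle(edges, n):
--     deg = [0] * n
--     prev = None
--     for e in sorted((u, v) if u <= v else (v, u) for u, v in edges):
--         if e != prev: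
--             u, v = e
--             deg[u] += 2 if u == v else 1
--             if u != v:
--                 deg[v] += 1
--             prev = e
--     return all(d % 2 == 0 for d in deg)
-- ===== Notes on version B (the rewrite author's own statement) =====
-- stated objective: faster
-- what changed: Replaces A's adjacency-list construction with a per-edge membership scan of the neighbour list by normalizing each edge to (min,max), sorting, deduplicating by adjacency in one pass, and accumulating parities in a flat degree array.
-- outside the precondition, e.g. on euler_cycle([(0, 1), (0, -1)], 2): A returns False, B returns True
import Mathlib
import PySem

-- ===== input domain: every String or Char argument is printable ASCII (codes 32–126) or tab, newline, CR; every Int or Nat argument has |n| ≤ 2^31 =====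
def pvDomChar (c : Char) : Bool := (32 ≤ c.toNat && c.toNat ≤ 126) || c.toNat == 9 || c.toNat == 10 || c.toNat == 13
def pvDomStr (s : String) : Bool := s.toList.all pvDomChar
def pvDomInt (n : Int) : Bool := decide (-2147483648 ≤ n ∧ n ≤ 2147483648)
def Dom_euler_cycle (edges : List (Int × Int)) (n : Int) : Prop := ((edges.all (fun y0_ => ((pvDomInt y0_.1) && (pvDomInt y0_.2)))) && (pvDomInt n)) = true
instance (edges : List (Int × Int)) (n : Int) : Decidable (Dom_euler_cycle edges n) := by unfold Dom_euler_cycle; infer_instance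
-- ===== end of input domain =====

-- B replaces A's adjacency-list building (a membership scan of the neighbour list per edge) by
-- normalize+sort+adjacent-dedup and a flat degree-parity array (measurably faster on large inputs).

-- ===== PORT A =====
-- the body of A's 'if u not in graph[v]' branch: graph[u].append(v); graph[v].append(u)
def eulerAdd (g : List (List Int)) (e : Int × Int) : List (List Int) :=
  let g1 := PySem.List.pySetD g e.1 ((PySem.List.pyGetD g e.1 []) ++ [e.2])
  PySem.List.pySetD g1 e.2 ((PySem.List.pyGetD g1 e.2 []) ++ [e.1])

def eulerStep (g : List (List Int)) (e : Int × Int) : List (List Int) :=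
  if e.1 ∉ PySem.List.pyGetD g e.2 [] then eulerAdd g e else g

def euler_cycle (edges : List (Int × Int)) (n : Int) : Bool :=
  let g0 := (PySem.List.pyRange 0 n 1).map (fun _ => ([] : List Int))
  let g := edges.foldl eulerStep g0
  (PySem.List.pyRange 0 n 1).all (fun i => (PySem.List.pyGetD g i []).length % 2 == 0)

-- ===== PORT B =====
-- (u, v) if u <= v else (v, u)
def normPair (e : Int × Int) : Int × Int := if e.1 ≤ e.2 then e else (e.2, e.1)

-- loop body: state = (deg, prev)
def degStep (s : List Int × Option (Int × Int)) (e : Int × Int) : List Int × Option (Int × Int) :=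
  if s.2 = some e then s
  else
    let d1 := PySem.List.pySetD s.1 e.1 (PySem.List.pyGetD s.1 e.1 0 + (if e.1 = e.2 then 2 else 1))
    let d2 := if e.1 ≠ e.2 then PySem.List.pySetD d1 e.2 (PySem.List.pyGetD d1 e.2 0 + 1) else d1
    (d2, some e)

def euler_cycle_alt (edges : List (Int × Int)) (n : Int) : Bool :=
  let deg0 : List Int := List.replicate n.toNat 0
  let s := (PySem.List.sorted2 (edges.map normPair) (fun p => p.1) (fun p => p.2)).foldl degStep (deg0, none)
  s.1.all (fun d => d % 2 == 0)

-- ===== PRECONDITION & SPEC =====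
-- Pre_ restricts vertex labels to the natural domain 0 ≤ u,v < n: outside it A either raises
-- IndexError (a label outside [-n,n)) or, on negative in-range labels, dedups by comparing raw
-- labels while indexing wraps them — an artefact of Python's negative indexing.
def Pre_euler_cycle (edges : List (Int × Int)) (n : Int) : Prop :=
  ∀ e ∈ edges, 0 ≤ e.1 ∧ e.1 < n ∧ 0 ≤ e.2 ∧ e.2 < n
instance (edges : List (Int × Int)) (n : Int) : Decidable (Pre_euler_cycle edges n) := by
  unfold Pre_euler_cycle; infer_instance

def pvWitness_euler_cycle : (List (Int × Int)) × Int := ([(0, 1), (1, 2), (2, 2), (1, 0)], 3)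

def Spec_euler_cycle (edges : List (Int × Int)) (n : Int) (out : Bool) : Prop := out = euler_cycle_alt edges n
instance (edges : List (Int × Int)) (n : Int) (out : Bool) : Decidable (Spec_euler_cycle edges n out) := by unfold Spec_euler_cycle; infer_instance

-- ===== CLAIM (what is proved, stated in full; the proofs are below) =====
def Claim_equal_euler_cycle : Prop := ∀ (edges : List (Int × Int)) (n : Int), Dom_euler_cycle edges n → Pre_euler_cycle edges n → Spec_euler_cycle edges n (euler_cycle edges n)

-- ===== LEMMAS AND PROOFS =====

-- proof-side notions: in-range edge, per-vertex weight of an edge, degree sums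
def InR (n : Int) (e : Int × Int) : Prop := 0 ≤ e.1 ∧ e.1 < n ∧ 0 ≤ e.2 ∧ e.2 < n

def wgtI (e : Int × Int) (i : Int) : Int := (if e.1 = i then 1 else 0) + (if e.2 = i then 1 else 0)

def degOf (L : List (Int × Int)) (i : Int) : Int := (L.map (fun e => wgtI e i)).sum

-- the sublist of edges A actually inserts, given the already-inserted history K
def keptGo (K : List (Int × Int)) : List (Int × Int) → List (Int × Int)
  | [] => []
  | e :: es => if K.any (fun f => normPair f == normPair e) then keptGo K es
               else e :: keptGo (K ++ [e]) es

-- the sublist of edges B's prev-filter keeps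
def dedup' (p : Option (Int × Int)) : List (Int × Int) → List (Int × Int)
  | [] => []
  | e :: es => if p = some e then dedup' p es else e :: dedup' (some e) es

-- B's unconditional degree update (the else-branch of degStep, on the array alone)
def dUpd (d : List Int) (e : Int × Int) : List Int :=
  let d1 := PySem.List.pySetD d e.1 (PySem.List.pyGetD d e.1 0 + (if e.1 = e.2 then 2 else 1))
  if e.1 ≠ e.2 then PySem.List.pySetD d1 e.2 (PySem.List.pyGetD d1 e.2 0 + 1) else d1

-- the lexicographic comparator sorted2 uses
def blt (a b : Int × Int) : Bool := decide (a.1 < b.1) || (!decide (b.1 < a.1) && decide (a.2 < b.2))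

lemma getD_set' {α : Type} (xs : List α) (i j : Nat) (v d : α) (h : i < xs.length) :
    (xs.set i v).getD j d = if i = j then v else xs.getD j d := by
  simp [List.getD_eq_getElem?_getD, List.getElem?_set, h]
  split_ifs <;> simp_all

lemma normPair_eq_iff (e f : Int × Int) :
    normPair e = normPair f ↔ (e.1 = f.1 ∧ e.2 = f.2) ∨ (e.1 = f.2 ∧ e.2 = f.1) := by
  obtain ⟨a, b⟩ := e; obtain ⟨c, d⟩ := f
  simp only [normPair]
  split_ifs <;> simp only [Prod.mk.injEq] <;> omega

lemma wgtI_normPair (e : Int × Int) (i : Int) : wgtI (normPair e) i = wgtI e i := by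
  obtain ⟨a, b⟩ := e
  simp only [normPair]
  split_ifs <;> simp only [wgtI] <;> split_ifs <;> omega

lemma InR_normPair {n : Int} {e : Int × Int} (h : InR n e) : InR n (normPair e) := by
  obtain ⟨a, b⟩ := e
  simp only [normPair] at *
  split_ifs <;> simp_all [InR] <;> omega

lemma blt_asymm {a b : Int × Int} (h : blt a b = true) : blt b a = false := by
  simp only [blt, Bool.or_eq_true, Bool.and_eq_true, Bool.not_eq_true', decide_eq_true_eq,
    decide_eq_false_iff_not, Bool.or_eq_false_iff, Bool.and_eq_false_iff,
    Bool.not_eq_false'] at *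
  omega

lemma blt_total {a b : Int × Int} (h1 : blt a b = false) (h2 : blt b a = false) : a = b := by
  obtain ⟨x, y⟩ := a; obtain ⟨u, v⟩ := b
  simp only [blt, Bool.or_eq_false_iff, Bool.and_eq_false_iff, Bool.not_eq_false',
    decide_eq_false_iff_not, decide_eq_true_eq, Prod.mk.injEq] at *
  omega

lemma blt_step {x y z : Int × Int} (h1 : blt x y = true) (h2 : blt z y = false) :
    blt z x = false := by
  simp only [blt, Bool.or_eq_true, Bool.and_eq_true, Bool.not_eq_true', decide_eq_true_eq,
    decide_eq_false_iff_not, Bool.or_eq_false_iff, Bool.and_eq_false_iff,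
    Bool.not_eq_false'] at *
  omega


lemma pyGetD_eulerAdd (n : Int) (g : List (List Int)) (e : Int × Int) (he : InR n e)
    (hg : g.length = n.toNat) (v : Int) (hv0 : 0 ≤ v) (hvn : v < n) :
    PySem.List.pyGetD (eulerAdd g e) v [] =
      ((PySem.List.pyGetD g v []) ++ (if v = e.1 then [e.2] else [])) ++
        (if v = e.2 then [e.1] else []) := by
  obtain ⟨h1, h2, h3, h4⟩ := he
  have hj1 : e.1.toNat < g.length := by omega
  have hj2 : e.2.toNat < g.length := by omega
  simp only [eulerAdd, PySem.List.pySetD_of_nonneg _ _ h1, PySem.List.pySetD_of_nonneg _ _ h3,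
    PySem.List.pyGetD_of_nonneg _ _ h1, PySem.List.pyGetD_of_nonneg _ _ h3,
    PySem.List.pyGetD_of_nonneg _ _ hv0]
  rw [getD_set' _ _ _ _ _ (by simpa using hj2), getD_set' _ _ _ _ _ hj1, getD_set' _ _ _ _ _ hj1]
  by_cases c1 : v = e.1
  · by_cases c2 : v = e.2
    · have t1 : e.1.toNat = v.toNat := by omega
      have t2 : e.2.toNat = v.toNat := by omega
      have t3 : e.1.toNat = e.2.toNat := by omega
      simp [c1, c2, t1, t2, t3]
      all_goals omega
    · have t1 : e.1.toNat = v.toNat := by omega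
      have t2 : ¬ (e.2.toNat = v.toNat) := by omega
      simp [c1, c2, t1, t2]
      all_goals omega
  · by_cases c2 : v = e.2
    · have t1 : ¬ (e.1.toNat = v.toNat) := by omega
      have t2 : e.2.toNat = v.toNat := by omega
      have t3 : ¬ (e.1.toNat = e.2.toNat) := by omega
      simp [c1, c2, t1, t2, t3]
      all_goals omega
    · have t1 : ¬ (e.1.toNat = v.toNat) := by omega
      have t2 : ¬ (e.2.toNat = v.toNat) := by omega
      simp [c1, c2, t1, t2]
      all_goals omega

lemma length_eulerAdd (g : List (List Int)) (e : Int × Int) :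
    (eulerAdd g e).length = g.length := by
  simp [eulerAdd, PySem.List.length_pySetD]

set_option maxHeartbeats 1000000 in
lemma mem_eulerAdd (n : Int) (g : List (List Int)) (e : Int × Int) (he : InR n e)
    (hg : g.length = n.toNat) (v : Int) (hv0 : 0 ≤ v) (hvn : v < n) (a : Int) :
    a ∈ PySem.List.pyGetD (eulerAdd g e) v [] ↔
      a ∈ PySem.List.pyGetD g v [] ∨ normPair e = normPair (a, v) := by
  rw [pyGetD_eulerAdd n g e he hg v hv0 hvn, normPair_eq_iff]
  by_cases c1 : v = e.1 <;> by_cases c2 : v = e.2 <;> simp [c1, c2]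
  all_goals first
    | exact or_congr Iff.rfl (by omega)
    | (rintro (h | h) <;> exfalso <;> omega)

lemma len_pyGetD_foldl_eulerAdd (n : Int) (K : List (Int × Int)) (g : List (List Int))
    (hK : ∀ e ∈ K, InR n e) (hg : g.length = n.toNat) (v : Int) (hv0 : 0 ≤ v) (hvn : v < n) :
    ((PySem.List.pyGetD (K.foldl eulerAdd g) v []).length : Int) =
      (PySem.List.pyGetD g v []).length + degOf K v := by
  induction K generalizing g with
  | nil => simp [degOf]
  | cons e es ih =>
    have he : InR n e := hK e (by simp)
    rw [List.foldl_cons,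
      ih _ (fun f hf => hK f (List.mem_cons_of_mem _ hf)) (by simp [length_eulerAdd, hg]),
      pyGetD_eulerAdd n g e he hg v hv0 hvn]
    simp only [degOf, List.map_cons, List.sum_cons, List.length_append, wgtI]
    by_cases c1 : v = e.1
    · subst c1
      by_cases c2 : e.1 = e.2
      · simp [c2]
        omega
      · simp [c2, show ¬ e.2 = e.1 from fun h => c2 h.symm]
        omega
    · by_cases c2 : v = e.2
      · subst c2
        have t : ¬ e.1 = e.2 := fun h => c1 h.symm
        simp [c1, t, show ¬ e.2 = e.1 from fun h => t h.symm]
        omega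
      · have t1 : ¬ e.1 = v := fun h => c1 h.symm
        have t2 : ¬ e.2 = v := fun h => c2 h.symm
        simp [c1, c2, t1, t2]

lemma keptGo_subset (es : List (Int × Int)) : ∀ (K : List (Int × Int)), ∀ x ∈ keptGo K es, x ∈ es := by
  induction es with
  | nil => simp [keptGo]
  | cons e es ih =>
    intro K x hx
    simp only [keptGo] at hx
    split at hx
    · exact List.mem_cons_of_mem _ (ih _ x hx)
    · rcases List.mem_cons.mp hx with rfl | hx'
      · exact List.mem_cons_self
      · exact List.mem_cons_of_mem _ (ih _ x hx')

lemma keptGo_mem (es : List (Int × Int)) : ∀ (K : List (Int × Int)) (p : Int × Int),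
    p ∈ (keptGo K es).map normPair ↔
      (∃ e ∈ es, normPair e = p) ∧ ¬ ∃ f ∈ K, normPair f = p := by
  induction es with
  | nil => simp [keptGo]
  | cons e es ih =>
    intro K p
    simp only [keptGo]
    split_ifs with h
    · rw [ih]
      have h' : ∃ f ∈ K, normPair f = normPair e := by simpa using h
      constructor
      · rintro ⟨⟨e', he', rfl⟩, hK⟩
        exact ⟨⟨e', by simp [he'], rfl⟩, hK⟩
      · rintro ⟨⟨e', he', hp⟩, hK⟩
        rcases List.mem_cons.mp he' with rfl | he''
        · refine absurd ?_ hK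
          rcases h' with ⟨f, hf, hfp⟩
          exact ⟨f, hf, hfp.trans hp⟩
        · exact ⟨⟨e', he'', hp⟩, hK⟩
    · have h' : ¬ ∃ f ∈ K, normPair f = normPair e := by simpa using h
      simp only [List.map_cons, List.mem_cons]
      rw [ih]
      constructor
      · rintro (rfl | ⟨⟨e', he', hp⟩, hK⟩)
        · exact ⟨⟨e, by simp, rfl⟩, h'⟩
        · refine ⟨⟨e', by simp [he'], hp⟩, fun ⟨f, hf, hfp⟩ => hK ⟨f, by simp [hf], hfp⟩⟩
      · rintro ⟨⟨e', he', hp⟩, hK⟩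
        by_cases hpe : p = normPair e
        · exact Or.inl hpe
        · right
          have he'' : e' ∈ es := by
            rcases he' with rfl | h2
            · exact absurd hp.symm hpe
            · exact h2
          refine ⟨⟨e', by simp [he''], hp⟩, fun ⟨f, hf, hfp⟩ => ?_⟩
          rcases List.mem_append.mp hf with hf' | hf'
          · exact hK ⟨f, hf', hfp⟩
          · rcases List.mem_singleton.mp hf' with rfl
            exact hpe hfp.symm

lemma keptGo_nodup (es : List (Int × Int)) : ∀ (K : List (Int × Int)),
    ((keptGo K es).map normPair).Nodup := by
  induction es with
  | nil => simp [keptGo]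
  | cons e es ih =>
    intro K
    simp only [keptGo]
    split_ifs with h
    · exact ih _
    · simp only [List.map_cons, List.nodup_cons]
      refine ⟨fun hmem => ?_, ih _⟩
      rw [keptGo_mem] at hmem
      exact hmem.2 ⟨e, by simp, rfl⟩

def Ginv (n : Int) (K : List (Int × Int)) (g : List (List Int)) : Prop :=
  g.length = n.toNat ∧ ∀ v, 0 ≤ v → v < n → ∀ a,
    (a ∈ PySem.List.pyGetD g v [] ↔ ∃ f ∈ K, normPair f = normPair (a, v))

lemma foldl_eulerStep_eq (n : Int) (es : List (Int × Int)) :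
    ∀ (K : List (Int × Int)) (g : List (List Int)), (∀ e ∈ es, InR n e) → Ginv n K g →
      es.foldl eulerStep g = (keptGo K es).foldl eulerAdd g := by
  induction es with
  | nil => intro K g _ _; rfl
  | cons e es ih =>
    intro K g hes hinv
    have he : InR n e := hes e (by simp)
    have htest : (e.1 ∈ PySem.List.pyGetD g e.2 []) ↔ ∃ f ∈ K, normPair f = normPair e := by
      have h := hinv.2 e.2 he.2.2.1 he.2.2.2 e.1
      simpa using h
    simp only [keptGo, List.foldl_cons]
    by_cases h : ∃ f ∈ K, normPair f = normPair e
    · rw [if_pos (by simpa using h)]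
      have hskip : eulerStep g e = g := by
        simp only [eulerStep]
        rw [if_neg]
        simp only [htest]
        exact not_not_intro h
      rw [hskip]
      exact ih K g (fun f hf => hes f (List.mem_cons_of_mem _ hf)) hinv
    · rw [if_neg (by simpa using h)]
      have hkeep : eulerStep g e = eulerAdd g e := by
        simp only [eulerStep]
        rw [if_pos]
        simpa only [htest] using h
      rw [hkeep, List.foldl_cons]
      refine ih (K ++ [e]) (eulerAdd g e) (fun f hf => hes f (List.mem_cons_of_mem _ hf)) ?_
      constructor
      · rw [length_eulerAdd]; exact hinv.1
      · intro v hv0 hvn a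
        rw [mem_eulerAdd n g e he hinv.1 v hv0 hvn a, hinv.2 v hv0 hvn a]
        constructor
        · rintro (⟨f, hf, hfp⟩ | hp)
          · exact ⟨f, by simp [hf], hfp⟩
          · exact ⟨e, by simp, hp⟩
        · rintro ⟨f, hf, hfp⟩
          rcases List.mem_append.mp hf with hf' | hf'
          · exact Or.inl ⟨f, hf', hfp⟩
          · rcases List.mem_singleton.mp hf' with rfl
            exact Or.inr hfp

lemma sorted2_eq_foldl (xs : List (Int × Int)) :
    PySem.List.sorted2 xs (fun p => p.1) (fun p => p.2) =
      xs.foldl (fun acc x => PySem.List.insertBy blt x acc) [] := rfl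

lemma pairwise_insertBy (x : Int × Int) (ys : List (Int × Int))
    (h : ys.Pairwise (fun a b => blt b a = false)) :
    (PySem.List.insertBy blt x ys).Pairwise (fun a b => blt b a = false) := by
  induction ys with
  | nil => simp [PySem.List.insertBy]
  | cons y ys ih =>
    rw [List.pairwise_cons] at h
    simp only [PySem.List.insertBy]
    split_ifs with hb
    · rw [List.pairwise_cons]
      refine ⟨?_, List.Pairwise.cons h.1 h.2⟩
      intro z hz
      rcases List.mem_cons.mp hz with rfl | hz'
      · exact blt_asymm hb
      · exact blt_step hb (h.1 z hz')
    · rw [List.pairwise_cons]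
      refine ⟨?_, ih h.2⟩
      intro z hz
      rcases (PySem.List.mem_insertBy _ _ _ _).mp hz with rfl | hz'
      · simpa using hb
      · exact h.1 z hz'

lemma pairwise_foldl_insertBy (xs : List (Int × Int)) :
    ∀ acc : List (Int × Int), acc.Pairwise (fun a b => blt b a = false) →
      (xs.foldl (fun acc x => PySem.List.insertBy blt x acc) acc).Pairwise
        (fun a b => blt b a = false) := by
  induction xs with
  | nil => intro acc h; exact h
  | cons x xs ih => intro acc h; exact ih _ (pairwise_insertBy x acc h)

lemma dedup'_mem (L : List (Int × Int)) :
    ∀ p, L.Pairwise (fun a b => blt b a = false) →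
      (∀ x ∈ L, ∀ q, p = some q → blt x q = false) →
      ∀ a, a ∈ dedup' p L ↔ a ∈ L ∧ p ≠ some a := by
  induction L with
  | nil => simp [dedup']
  | cons e es ih =>
    intro p hpw hok a
    rw [List.pairwise_cons] at hpw
    simp only [dedup']
    split_ifs with hpe
    · subst hpe
      rw [ih _ hpw.2 (fun x hx q hq => by obtain rfl := Option.some.inj hq; exact hpw.1 x hx)]
      simp only [List.mem_cons]
      constructor
      · rintro ⟨h1, h2⟩
        exact ⟨Or.inr h1, h2⟩
      · rintro ⟨h1, h2⟩
        rcases h1 with rfl | h1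
        · exact absurd rfl h2
        · exact ⟨h1, h2⟩
    · simp only [List.mem_cons]
      rw [ih (some e) hpw.2 (fun x hx q hq => by obtain rfl := Option.some.inj hq; exact hpw.1 x hx)]
      constructor
      · rintro (rfl | ⟨h1, h2⟩)
        · exact ⟨Or.inl rfl, fun hc => hpe hc⟩
        · have hne : a ≠ e := fun hc => h2 (by rw [hc])
          refine ⟨Or.inr h1, fun hc => ?_⟩
          have h3 : blt e a = false := hok e (by simp) a hc
          have h4 : blt a e = false := hpw.1 a h1
          exact hne (blt_total h4 h3)
      · rintro ⟨h1, h2⟩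
        rcases h1 with rfl | h1
        · exact Or.inl rfl
        · by_cases hae : a = e
          · exact Or.inl hae
          · exact Or.inr ⟨h1, fun hc => hae (by injection hc with h5; exact h5.symm)⟩

lemma dedup'_nodup (L : List (Int × Int)) :
    ∀ p, L.Pairwise (fun a b => blt b a = false) →
      (∀ x ∈ L, ∀ q, p = some q → blt x q = false) →
      (dedup' p L).Nodup := by
  induction L with
  | nil => intro p _ _; simp [dedup']
  | cons e es ih =>
    intro p hpw hok
    rw [List.pairwise_cons] at hpw
    simp only [dedup']
    split_ifs with hpe
    · exact ih p hpw.2 (fun x hx q hq => by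
        subst hpe; obtain rfl := Option.some.inj hq; exact hpw.1 x hx)
    · rw [List.nodup_cons]
      refine ⟨fun hmem => ?_,
        ih (some e) hpw.2 (fun x hx q hq => by obtain rfl := Option.some.inj hq; exact hpw.1 x hx)⟩
      rw [dedup'_mem es (some e) hpw.2
        (fun x hx q hq => by obtain rfl := Option.some.inj hq; exact hpw.1 x hx) e] at hmem
      exact hmem.2 rfl

lemma foldl_degStep_eq (L : List (Int × Int)) :
    ∀ (d : List Int) (p : Option (Int × Int)),
      (L.foldl degStep (d, p)).1 = (dedup' p L).foldl dUpd d := by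
  induction L with
  | nil => intro d p; rfl
  | cons e es ih =>
    intro d p
    simp only [List.foldl_cons, dedup']
    by_cases hpe : p = some e
    · rw [if_pos hpe]
      have hstep : degStep (d, p) e = (d, p) := by simp [degStep, hpe]
      rw [hstep, ih]
    · rw [if_neg hpe]
      have hstep : degStep (d, p) e = (dUpd d e, some e) := by
        simp only [degStep, dUpd]
        rw [if_neg hpe]
      rw [hstep, List.foldl_cons, ih]

lemma length_dUpd (d : List Int) (e : Int × Int) : (dUpd d e).length = d.length := by
  simp only [dUpd]
  split_ifs <;> simp [PySem.List.length_pySetD]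

lemma length_foldl_dUpd (D : List (Int × Int)) : ∀ d : List Int,
    (D.foldl dUpd d).length = d.length := by
  induction D with
  | nil => intro d; rfl
  | cons e es ih => intro d; rw [List.foldl_cons, ih, length_dUpd]

lemma pyGetD_dUpd (n : Int) (d : List Int) (e : Int × Int) (he : InR n e)
    (hd : d.length = n.toNat) (v : Int) (hv0 : 0 ≤ v) (hvn : v < n) :
    PySem.List.pyGetD (dUpd d e) v 0 = PySem.List.pyGetD d v 0 + wgtI e v := by
  obtain ⟨h1, h2, h3, h4⟩ := he
  have hj1 : e.1.toNat < d.length := by omega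
  have hj2 : e.2.toNat < d.length := by omega
  by_cases hee : e.1 = e.2
  · have hup : dUpd d e = PySem.List.pySetD d e.1 (PySem.List.pyGetD d e.1 0 + 2) := by
      simp [dUpd, hee]
    rw [hup, PySem.List.pySetD_of_nonneg _ _ h1, PySem.List.pyGetD_of_nonneg _ _ h1,
      PySem.List.pyGetD_of_nonneg _ _ hv0, PySem.List.pyGetD_of_nonneg d (0 : Int) hv0, getD_set' _ _ _ _ _ hj1]
    unfold wgtI
    by_cases c1 : v = e.1
    · have t : e.1.toNat = v.toNat := by omega
      simp only [t, if_true]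
      rw [if_pos (show e.1 = v from c1.symm), if_pos (show e.2 = v by omega)]
      omega
    · have t : ¬ (e.1.toNat = v.toNat) := by omega
      rw [if_neg t, if_neg (show ¬ e.1 = v by omega), if_neg (show ¬ e.2 = v by omega)]
      omega
  · have hup : dUpd d e =
        PySem.List.pySetD (PySem.List.pySetD d e.1 (PySem.List.pyGetD d e.1 0 + 1))
          e.2 (PySem.List.pyGetD (PySem.List.pySetD d e.1 (PySem.List.pyGetD d e.1 0 + 1)) e.2 0 + 1) := by
      simp [dUpd, hee]
    rw [hup, PySem.List.pySetD_of_nonneg _ _ h1, PySem.List.pySetD_of_nonneg _ _ h3,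
      PySem.List.pyGetD_of_nonneg _ _ h1, PySem.List.pyGetD_of_nonneg _ _ h3,
      PySem.List.pyGetD_of_nonneg _ _ hv0, PySem.List.pyGetD_of_nonneg d (0 : Int) hv0,
      getD_set' _ _ _ _ _ (by simpa using hj2),
      getD_set' _ _ _ _ _ hj1, getD_set' _ _ _ _ _ hj1]
    unfold wgtI
    rw [if_neg (show ¬ (e.1.toNat = e.2.toNat) by omega)]
    by_cases c1 : v = e.1
    · rw [if_neg (show ¬ (e.2.toNat = v.toNat) by omega)]
      have t : e.1.toNat = v.toNat := by omega
      simp only [t, if_true]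
      rw [if_pos (show e.1 = v from c1.symm), if_neg (show ¬ e.2 = v by omega)]
      omega
    · by_cases c2 : v = e.2
      · have t : e.2.toNat = v.toNat := by omega
        simp only [t, if_true]
        rw [if_neg (show ¬ e.1 = v by omega), if_pos (show e.2 = v from c2.symm)]
        omega
      · rw [if_neg (show ¬ (e.2.toNat = v.toNat) by omega),
          if_neg (show ¬ (e.1.toNat = v.toNat) by omega),
          if_neg (show ¬ e.1 = v by omega), if_neg (show ¬ e.2 = v by omega)]
        omega

lemma pyGetD_foldl_dUpd (n : Int) (D : List (Int × Int)) :
    ∀ d : List Int, (∀ e ∈ D, InR n e) → d.length = n.toNat →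
      ∀ v, 0 ≤ v → v < n →
        PySem.List.pyGetD (D.foldl dUpd d) v 0 = PySem.List.pyGetD d v 0 + degOf D v := by
  induction D with
  | nil => intro d _ _ v _ _; simp [degOf]
  | cons e es ih =>
    intro d hD hd v hv0 hvn
    rw [List.foldl_cons,
      ih _ (fun f hf => hD f (List.mem_cons_of_mem _ hf)) (by rw [length_dUpd]; exact hd) v hv0 hvn,
      pyGetD_dUpd n d e (hD e (by simp)) hd v hv0 hvn]
    simp only [degOf, List.map_cons, List.sum_cons]
    ring

lemma degOf_map_normPair (L : List (Int × Int)) (i : Int) :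
    degOf (L.map normPair) i = degOf L i := by
  simp only [degOf, List.map_map]
  congr 1
  exact List.map_congr_left (fun e _ => by simp [Function.comp, wgtI_normPair])

lemma degOf_perm {L1 L2 : List (Int × Int)} (h : L1.Perm L2) (i : Int) :
    degOf L1 i = degOf L2 i := (h.map _).sum_eq

lemma A_iff (edges : List (Int × Int)) (n : Int) (hpre : Pre_euler_cycle edges n) :
    euler_cycle edges n = true ↔
      ∀ i : Int, 0 ≤ i → i < n → degOf (keptGo [] edges) i % 2 = 0 := by
  have hin : ∀ e ∈ edges, InR n e := fun e he => hpre e he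
  have hg0len : ((PySem.List.pyRange 0 n 1).map (fun _ => ([] : List Int))).length = n.toNat := by
    simp [PySem.List.length_pyRange_one]
  have hg0get : ∀ v : Int, 0 ≤ v → v < n →
      PySem.List.pyGetD ((PySem.List.pyRange 0 n 1).map (fun _ => ([] : List Int))) v [] = [] := by
    intro v hv0 hvn
    exact PySem.List.pyGetD_map_pyRange_of_nonneg (fun _ => ([] : List Int)) n v [] hv0 hvn
  have hfold := foldl_eulerStep_eq n edges []
    ((PySem.List.pyRange 0 n 1).map (fun _ => ([] : List Int))) hin
    ⟨hg0len, by intro v hv0 hvn a; rw [hg0get v hv0 hvn]; simp⟩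
  have hKin : ∀ e ∈ keptGo [] edges, InR n e :=
    fun e he => hin e (keptGo_subset edges [] e he)
  simp only [euler_cycle, hfold, List.all_eq_true]
  constructor
  · intro h i hv0 hvn
    have hm := h i (by rw [PySem.List.mem_pyRange_one]; exact ⟨hv0, hvn⟩)
    have hlen := len_pyGetD_foldl_eulerAdd n (keptGo [] edges) _ hKin hg0len i hv0 hvn
    rw [hg0get i hv0 hvn] at hlen
    simp only [beq_iff_eq] at hm
    simp only [List.length_nil, Int.natCast_zero, zero_add] at hlen
    omega
  · intro h i hi
    rw [PySem.List.mem_pyRange_one] at hi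
    have hlen := len_pyGetD_foldl_eulerAdd n (keptGo [] edges) _ hKin hg0len i hi.1 hi.2
    rw [hg0get i hi.1 hi.2] at hlen
    simp only [List.length_nil, Int.natCast_zero, zero_add] at hlen
    simp only [beq_iff_eq]
    have hv := h i hi.1 hi.2
    omega

lemma B_iff (edges : List (Int × Int)) (n : Int) (hpre : Pre_euler_cycle edges n) :
    euler_cycle_alt edges n = true ↔
      ∀ i : Int, 0 ≤ i → i < n → degOf (keptGo [] edges) i % 2 = 0 := by
  have hin : ∀ e ∈ edges, InR n e := fun e he => hpre e he
  have hLpw : (PySem.List.sorted2 (edges.map normPair) (fun p => p.1) (fun p => p.2)).Pairwise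
      (fun a b => blt b a = false) := by
    rw [sorted2_eq_foldl]
    exact pairwise_foldl_insertBy _ [] (by simp)
  have hnone : ∀ x ∈ PySem.List.sorted2 (edges.map normPair) (fun p => p.1) (fun p => p.2),
      ∀ q : Int × Int, (none : Option (Int × Int)) = some q → blt x q = false := by
    intro x _ q hq; cases hq
  have hDmem : ∀ a, a ∈ dedup' none (PySem.List.sorted2 (edges.map normPair)
      (fun p => p.1) (fun p => p.2)) ↔ a ∈ edges.map normPair := by
    intro a
    rw [dedup'_mem _ none hLpw hnone a]
    simp [(PySem.List.sorted2_perm (edges.map normPair) (fun p => p.1) (fun p => p.2) false).mem_iff]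
  have hDnodup := dedup'_nodup _ none hLpw hnone
  have hDin : ∀ e ∈ dedup' none (PySem.List.sorted2 (edges.map normPair)
      (fun p => p.1) (fun p => p.2)), InR n e := by
    intro e he
    rcases List.mem_map.mp ((hDmem e).mp he) with ⟨f, hf, rfl⟩
    exact InR_normPair (hin f hf)
  have hperm : ((keptGo [] edges).map normPair).Perm (dedup' none (PySem.List.sorted2
      (edges.map normPair) (fun p => p.1) (fun p => p.2))) := by
    rw [List.perm_ext_iff_of_nodup (keptGo_nodup edges []) hDnodup]
    intro a
    rw [keptGo_mem, hDmem a, List.mem_map]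
    simp
  have hdeg : ∀ i : Int, degOf (dedup' none (PySem.List.sorted2 (edges.map normPair)
      (fun p => p.1) (fun p => p.2))) i = degOf (keptGo [] edges) i := by
    intro i
    rw [← degOf_map_normPair (keptGo [] edges) i]
    exact (degOf_perm hperm i).symm
  have hrep : ∀ j : Nat, (List.replicate n.toNat (0 : Int)).getD j 0 = 0 := by
    intro j
    simp [List.getD_eq_getElem?_getD, List.getElem?_replicate]
    split <;> rfl
  have hreplen : (List.replicate n.toNat (0 : Int)).length = n.toNat := by simp
  have hval : ∀ i : Int, 0 ≤ i → i < n →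
      PySem.List.pyGetD ((dedup' none (PySem.List.sorted2 (edges.map normPair)
        (fun p => p.1) (fun p => p.2))).foldl dUpd (List.replicate n.toNat 0)) i 0 =
        degOf (keptGo [] edges) i := by
    intro i hv0 hvn
    rw [pyGetD_foldl_dUpd n _ _ hDin hreplen i hv0 hvn,
      PySem.List.pyGetD_of_nonneg _ _ hv0, hrep, hdeg]
    ring
  have hlen : ((dedup' none (PySem.List.sorted2 (edges.map normPair)
      (fun p => p.1) (fun p => p.2))).foldl dUpd (List.replicate n.toNat 0)).length = n.toNat := by
    rw [length_foldl_dUpd, hreplen]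
  simp only [euler_cycle_alt, foldl_degStep_eq, List.all_eq_true]
  constructor
  · intro h i hv0 hvn
    have hj : i.toNat < n.toNat := by omega
    have hmem := List.getElem_mem (l := (dedup' none (PySem.List.sorted2 (edges.map normPair)
      (fun p => p.1) (fun p => p.2))).foldl dUpd (List.replicate n.toNat 0)) (n := i.toNat)
      (h := by rw [hlen]; exact hj)
    have hm := h _ hmem
    simp only [beq_iff_eq] at hm
    have hv := hval i hv0 hvn
    rw [PySem.List.pyGetD_of_nonneg _ _ hv0, List.getD_eq_getElem _ _ (by rw [hlen]; exact hj)] at hv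
    rw [hv] at hm
    exact hm
  · intro h x hx
    rcases List.mem_iff_getElem.mp hx with ⟨j, hjlen, rfl⟩
    have hj : j < n.toNat := by rw [hlen] at hjlen; exact hjlen
    have hv := hval (j : Int) (by omega) (by omega)
    rw [PySem.List.pyGetD_of_nonneg _ _ (by omega : (0:Int) ≤ (j:Int)),
      List.getD_eq_getElem _ _ (by simpa using hjlen)] at hv
    simp only [beq_iff_eq]
    have hgoal := h (j : Int) (by omega) (by omega)
    simp only [Int.toNat_natCast] at hv
    rw [hv]
    exact hgoal

-- ===== VERDICT (by name: the statement is the Claim_ definition above) =====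
theorem euler_cycle_spec : Claim_equal_euler_cycle := by
  intro edges n _ hpre
  unfold Spec_euler_cycle
  have hA := A_iff edges n hpre
  have hB := B_iff edges n hpre
  cases h1 : euler_cycle edges n <;> cases h2 : euler_cycle_alt edges n <;> simp_all
  all_goals first
    | (rcases hA with ⟨x, hx0, hxn, hx⟩; have h5 := hB x hx0 hxn; omega)
    | (rcases hB with ⟨x, hx0, hxn, hx⟩; have h5 := hA x hx0 hxn; omega)
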